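-- pv_equiv track=rewrite | github.com/Andrewgo12/sql-analyzer-enterprise | sql_analyzer_clean/utils/validators.py | _check_semicolons
-- ===== SOURCE A (Python) =====
-- from typing import Dict, Any, List
--
-- def _check_semicolons(content: str) -> List[str]:
--     """Verificar uso de punto y coma"""
--     errors = []
--     lines = content.split('\n')
--
--     for line_num, line in enumerate(lines, 1):
--         line = line.strip()
--         if line and not line.startswith('--'):
--             # Verificar statements que deberían terminar en punto y coma
--             sql_statements = ['SELECT', 'INSERT', 'UPDATE', 'DELETE', 'CREATE', 'DROP', 'ALTER']
--
--             if any(line.upper().startswith(stmt) for stmt in sql_statements):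
--                 if not line.endswith(';') and line_num == len(lines):
--                     errors.append(f"Statement en línea {line_num} podría necesitar punto y coma")
--
--     return errors
-- ===== SOURCE B (Python) =====
-- from typing import List
--
--
-- def _check_semicolons(content: str) -> List[str]:
--     """Verificar uso de punto y coma (only the last line can ever be flagged)."""
--     lines = content.split('\n')
--     last = lines[-1].strip()
--     if (last and not last.startswith('--')
--             and last.upper().startswith(('SELECT', 'INSERT', 'UPDATE',
--                                          'DELETE', 'CREATE', 'DROP', 'ALTER'))
--             and not last.endswith(';')):
--         return [f"Statement en línea {len(lines)} podría necesitar punto y coma"]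
--     return []
-- ===== Notes on version B (the rewrite author's own statement) =====
-- stated objective: simpler
-- what changed: A's loop can only append when line_num == len(lines), so B drops the loop entirely and performs the single check directly on the last element of the split line list.
import Mathlib
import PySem

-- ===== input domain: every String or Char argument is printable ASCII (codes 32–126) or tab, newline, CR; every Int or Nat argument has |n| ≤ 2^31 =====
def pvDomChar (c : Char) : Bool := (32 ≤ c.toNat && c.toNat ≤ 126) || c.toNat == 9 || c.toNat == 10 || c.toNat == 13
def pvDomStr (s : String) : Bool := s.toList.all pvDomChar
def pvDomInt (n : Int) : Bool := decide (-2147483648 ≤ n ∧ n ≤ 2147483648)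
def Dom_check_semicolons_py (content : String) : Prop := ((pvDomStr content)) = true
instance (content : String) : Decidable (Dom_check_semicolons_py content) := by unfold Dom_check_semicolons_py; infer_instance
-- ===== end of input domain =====

-- B replaces A's loop over all lines by a single direct check of the last line,
-- since A's condition line_num == len(lines) can only fire there (objective: simpler).


-- ===== PORT A =====
def sqlStatementsA : List String := ["SELECT", "INSERT", "UPDATE", "DELETE", "CREATE", "DROP", "ALTER"]

-- the loop body of A (n = len(lines), p = (line_num, line))
def stepA (n : Int) (errors : List String) (p : Int × String) : List String :=
  -- line = p.2.strip(), written inline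
  if PySem.Str.strip p.2 != "" && !PySem.Str.startswith (PySem.Str.strip p.2) "--" then
    if sqlStatementsA.any (fun stmt => PySem.Str.startswith (PySem.Str.upper (PySem.Str.strip p.2)) stmt) then
      if !PySem.Str.endswith (PySem.Str.strip p.2) ";" && p.1 == n then
        errors ++ ["Statement en línea " ++ PySem.Int.toStr p.1 ++ " podría necesitar punto y coma"]
      else errors
    else errors
  else errors

def check_semicolons_py (content : String) : List String :=
  -- lines = content.split('\n'); sep "\n" ≠ "", so split? is always some
  (PySem.List.enumerate ((PySem.Str.split? content "\n").getD []) 1).foldl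
    (stepA ((((PySem.Str.split? content "\n").getD []).length : Int))) []

-- ===== PORT B =====
-- B's keyword tuple has the same elements; the shared constant avoids a duplicate literal
def check_semicolons_py_alt (content : String) : List String :=
  -- lines = content.split('\n') (always some since sep ≠ "");
  -- lines[-1]: split always returns a nonempty list, so pyGet? is never none
  let lines : List String := (PySem.Str.split? content "\n").getD []
  let last := PySem.Str.strip ((PySem.List.pyGet? lines (-1)).getD "")
  if last != "" && !PySem.Str.startswith last "--"
      && sqlStatementsA.any (fun k => PySem.Str.startswith (PySem.Str.upper last) k)
      && !PySem.Str.endswith last ";" then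
    ["Statement en línea " ++ PySem.Int.toStr (lines.length : Int) ++ " podría necesitar punto y coma"]
  else []

-- ===== PRECONDITION & SPEC =====
def Spec_check_semicolons_py (content : String) (out : List String) : Prop := out = check_semicolons_py_alt content
instance (content : String) (out : List String) : Decidable (Spec_check_semicolons_py content out) := by unfold Spec_check_semicolons_py; infer_instance

-- ===== CLAIM (what is proved, stated in full; the proofs are below) =====
def Claim_equal_check_semicolons_py : Prop := ∀ (content : String), Dom_check_semicolons_py content → Spec_check_semicolons_py content (check_semicolons_py content)

-- ===== LEMMAS AND PROOFS =====

theorem stepA_skip (n : Int) (errors : List String) (p : Int × String) (h : p.1 ≠ n) :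
    stepA n errors p = errors := by
  have hb : (p.1 == n) = false := by simpa using h
  simp only [stepA, hb, Bool.and_false]
  split <;> [skip; rfl]
  split <;> rfl

theorem foldl_skip (n : Int) (l : List String) (s : Int) (acc : List String)
    (h : s + l.length ≤ n) :
    (PySem.List.enumerate l s).foldl (stepA n) acc = acc := by
  induction l generalizing s acc with
  | nil => simp [PySem.List.enumerate_nil]
  | cons x xs ih =>
    rw [PySem.List.enumerate_cons, List.foldl_cons, stepA_skip n acc (s, x) (by simp at h ⊢; omega)]
    exact ih (s + 1) acc (by simp at h ⊢; omega)

theorem bool_shape (b1 b2 b3 b4 : Bool) (msg : String) :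
    (if b1 && !b2 then if b3 then if !b4 then ([] : List String) ++ [msg] else [] else [] else [])
      = (if b1 && !b2 && b3 && !b4 then [msg] else []) := by
  cases b1 <;> cases b2 <;> cases b3 <;> cases b4 <;> rfl

theorem stepA_last (n : Int) (line : String) :
    stepA n [] (n, line) =
    (if PySem.Str.strip line != "" && !PySem.Str.startswith (PySem.Str.strip line) "--"
        && sqlStatementsA.any (fun stmt => PySem.Str.startswith (PySem.Str.upper (PySem.Str.strip line)) stmt)
        && !PySem.Str.endswith (PySem.Str.strip line) ";" then
      ["Statement en línea " ++ PySem.Int.toStr n ++ " podría necesitar punto y coma"]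
    else []) := by
  simp only [stepA, beq_self_eq_true, Bool.and_true]
  exact bool_shape _ _ _ _ _

set_option maxHeartbeats 1000000 in
theorem key_last (lines : List String) :
    (PySem.List.enumerate lines 1).foldl (stepA (lines.length : Int)) [] =
    (if PySem.Str.strip ((PySem.List.pyGet? lines (-1)).getD "") != ""
         && !PySem.Str.startswith (PySem.Str.strip ((PySem.List.pyGet? lines (-1)).getD "")) "--"
         && sqlStatementsA.any (fun k =>
              PySem.Str.startswith (PySem.Str.upper (PySem.Str.strip ((PySem.List.pyGet? lines (-1)).getD ""))) k)
         && !PySem.Str.endswith (PySem.Str.strip ((PySem.List.pyGet? lines (-1)).getD "")) ";" then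
       ["Statement en línea " ++ PySem.Int.toStr (lines.length : Int) ++ " podría necesitar punto y coma"]
     else []) := by
  rcases List.eq_nil_or_concat lines with rfl | ⟨init, lastel, rfl⟩
  · decide
  · rw [List.concat_eq_append]
    have hget : (PySem.List.pyGet? (init ++ [lastel]) (-1)).getD "" = lastel := by
      rw [PySem.List.pyGet?_neg_one, List.getLast?_concat]
      rfl
    have harg : (1 + (init.length : Int)) = (((init ++ [lastel]).length : Int)) := by
      simp only [List.length_append, List.length_singleton]; push_cast; omega
    rw [hget, PySem.List.enumerate_append,
        PySem.List.enumerate_cons, PySem.List.enumerate_nil, List.foldl_append,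
        List.foldl_cons, List.foldl_nil,
        foldl_skip (((init ++ [lastel]).length : Int)) init 1 []
          (by simp only [List.length_append, List.length_singleton]; push_cast; omega),
        harg]
    exact stepA_last _ lastel

-- ===== VERDICT (by name: the statement is the Claim_ definition above) =====
theorem check_semicolons_py_spec : Claim_equal_check_semicolons_py := by
  intro content _
  exact key_last ((PySem.Str.split? content "\n").getD [])
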